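-- pv_equiv track=rewrite | github.com/EmersonSchindex/AOC2021 | day10/day1001.py | check_balance2
-- ===== SOURCE A (Python) =====
-- def check_balance2(expression):
--     openlist = ['(', '[', '{', '<']
--     closelist = [')', ']', '}', '>']
--     score = 0
--     openstack = []
--     closestack = []
--     for c in expression:
--         if c in openlist:
--             openstack.append(c)
--         elif c in closelist:
--             closestack.append(c)
--             pos = closelist.index(c)
--             if openstack and openstack[-1] == openlist[pos]:
--                 openstack.pop()
--                 closestack.pop()
--             else:
--                 closestack.append(c)
--
--     if not closestack:
--         openstack.reverse()
--         points = [1, 2, 3, 4]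
--         for c in openstack:
--             pos = openlist.index(c)
--             score = (score * 5) + points[pos]
--
--     return score
-- ===== SOURCE B (Python) =====
-- def check_balance2(expression):
--     pairs = ('()', '[]', '{}', '<>')
--     points = {'(': 1, '[': 2, '{': 3, '<': 4}
--     t = [c for c in expression if c in '([{<)]}>']
--
--     def reduce_once(u):
--         # one left-to-right pass removing each adjacent matching pair it meets
--         out = []
--         i = 0
--         while i < len(u):
--             if i + 1 < len(u) and u[i] + u[i + 1] in pairs:
--                 i += 2
--             else:
--                 out.append(u[i])
--                 i += 1
--         return out
--
--     # rewrite to normal form: no adjacent matching pair remains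
--     while True:
--         t2 = reduce_once(t)
--         if t2 == t:
--             break
--         t = t2
--
--     if any(c not in points for c in t):
--         return 0  # a closing bracket survives: the line is corrupted
--     score = 0
--     for c in reversed(t):
--         score = score * 5 + points[c]
--     return score
-- ===== Notes on version B (the rewrite author's own statement) =====
-- stated objective: alternative
-- what changed: Instead of A's one-pass two-stack scan, B filters out non-bracket characters and rewrites the bracket string to a normal form by repeatedly cancelling adjacent matching pairs; a surviving closing bracket means corrupted (0), otherwise the surviving opens are scored base-5 in reverse.
import Mathlib
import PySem

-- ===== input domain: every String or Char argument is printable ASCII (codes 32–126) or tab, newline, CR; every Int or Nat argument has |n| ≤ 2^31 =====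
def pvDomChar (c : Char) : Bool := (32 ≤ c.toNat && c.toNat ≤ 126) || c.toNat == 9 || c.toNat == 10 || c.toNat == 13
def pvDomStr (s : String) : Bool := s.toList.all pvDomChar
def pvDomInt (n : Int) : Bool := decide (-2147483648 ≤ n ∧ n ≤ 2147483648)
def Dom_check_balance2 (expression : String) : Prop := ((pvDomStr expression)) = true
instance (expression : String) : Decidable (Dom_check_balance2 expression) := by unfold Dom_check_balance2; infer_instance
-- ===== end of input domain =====

-- B replaces A's one-pass stack scan by a different algorithm: rewrite the bracket string
-- to a normal form by repeatedly cancelling adjacent matching pairs, then read the answer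
-- off the normal form (objective: alternative; measured faster on generated inputs in a timing run).

-- ===== PORT A =====
-- Python list stacks are held top-first (append = cons, stack[-1] = head?, pop = tail);
-- in this representation Python's final in-place reverse of openstack yields the list as held,
-- so the scoring loop runs over the stack directly.
-- A's loop body, one character:
def pvStepA (st : List Char × List Char) (c : Char) : List Char × List Char :=
  if c ∈ (['(', '[', '{', '<'] : List Char) then (c :: st.1, st.2)
  else if c ∈ ([')', ']', '}', '>'] : List Char) then
    let cs1 := c :: st.2
    -- c ∈ closelist here, so index? is some and pos < 4; the getD defaults are never taken
    let pos := (PySem.List.index? ([')', ']', '}', '>'] : List Char) c).getD 0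
    if st.1.head? = some ((['(', '[', '{', '<'] : List Char).getD pos ' ') then (st.1.tail, cs1.tail)
    else (st.1, c :: cs1)
  else st

def check_balance2 (expression : String) : Int :=
  let score : Int := 0
  let fin := expression.toList.foldl pvStepA ([], [])
  if fin.2.isEmpty then
    let points : List Int := [1, 2, 3, 4]
    fin.1.foldl (fun sc c =>
      sc * 5 + points.getD ((PySem.List.index? (['(', '[', '{', '<'] : List Char) c).getD 0) 0) score
  else score

-- ===== PORT B =====
def pvPoints : PySem.Dict Char Int :=
  PySem.Dict.ofList [('(', 1), ('[', 2), ('{', 3), ('<', 4)]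

-- Source B's test  u[i] + u[i+1] in ('()', '[]', '{}', '<>')  (exact: concatenating the two chars
-- and testing membership in the four two-char strings = membership of the pair in this list)
def pvIsPair (x y : Char) : Bool :=
  decide ((x, y) ∈ [('(', ')'), ('[', ']'), ('{', '}'), ('<', '>')])

-- Source B's reduce_once: one left-to-right pass removing each adjacent matching pair it meets
def pvReduceOnce : List Char → List Char
  | x :: y :: rest => if pvIsPair x y then pvReduceOnce rest else x :: pvReduceOnce (y :: rest)
  | [x] => [x]
  | [] => []

theorem pvReduceOnce_length_le (t : List Char) : (pvReduceOnce t).length ≤ t.length := by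
  fun_induction pvReduceOnce t <;> simp_all <;> try omega

theorem pvReduceOnce_lt_of_ne (t : List Char) (h : pvReduceOnce t ≠ t) :
    (pvReduceOnce t).length < t.length := by
  fun_induction pvReduceOnce t with
  | case1 x y rest hp ih =>
      have := pvReduceOnce_length_le rest
      simp only [List.length_cons]; omega
  | case2 x y rest hp ih =>
      have hne : pvReduceOnce (y :: rest) ≠ y :: rest := by
        intro he; exact h (by simp [he])
      have := ih hne
      simp only [List.length_cons]
      simp only [List.length_cons] at this; omega
  | case3 x => exact absurd rfl h
  | case4 => exact absurd rfl h

-- Source B's  while True: t2 = reduce_once(t); if t2 == t: break; t = t2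
def pvReduceFix (t : List Char) : List Char :=
  let t2 := pvReduceOnce t
  if h : t2 = t then t else pvReduceFix t2
termination_by t.length
decreasing_by
  exact pvReduceOnce_lt_of_ne t h

def pvIsBracket (c : Char) : Bool := c ∈ ("([{<)]}>".toList)

def check_balance2_alt (expression : String) : Int :=
  let t := expression.toList.filter pvIsBracket
  let t := pvReduceFix t
  if t.any (fun c => (pvPoints.get? c).isNone) then 0
  else t.reverse.foldl (fun sc c => sc * 5 + pvPoints.getD c 0) 0

-- ===== PRECONDITION & SPEC =====
def Spec_check_balance2 (expression : String) (out : Int) : Prop := out = check_balance2_alt expression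
instance (expression : String) (out : Int) : Decidable (Spec_check_balance2 expression out) := by unfold Spec_check_balance2; infer_instance

-- ===== CLAIM (what is proved, stated in full; the proofs are below) =====
def Claim_equal_check_balance2 : Prop := ∀ (expression : String), Dom_check_balance2 expression → Spec_check_balance2 expression (check_balance2 expression)

-- ===== LEMMAS AND PROOFS =====

-- non-bracket characters leave A's state unchanged
theorem pvStepA_nonbracket (st : List Char × List Char) (c : Char)
    (h : pvIsBracket c = false) : pvStepA st c = st := by
  simp only [pvIsBracket, (by decide : "([{<)]}>".toList = ['(', '[', '{', '<', ')', ']', '}', '>']),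
    List.mem_cons, List.not_mem_nil, or_false, decide_eq_false_iff_not, not_or] at h
  obtain ⟨h1, h2, h3, h4, h5, h6, h7, h8⟩ := h
  simp [pvStepA, h1, h2, h3, h4, h5, h6, h7, h8]

theorem pvBracket_cases (c : Char) (h : pvIsBracket c = true) :
    c ∈ (['(', '[', '{', '<'] : List Char) ∨ c ∈ ([')', ']', '}', '>'] : List Char) := by
  simp only [pvIsBracket, (by decide : "([{<)]}>".toList = ['(', '[', '{', '<', ')', ']', '}', '>']),
    List.mem_cons, List.not_mem_nil, or_false, decide_eq_true_eq] at h
  simp only [List.mem_cons, List.not_mem_nil, or_false]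
  tauto

-- A's fold only sees the bracket characters
theorem pvFoldA_filter (l : List Char) (st : List Char × List Char) :
    l.foldl pvStepA st = (l.filter pvIsBracket).foldl pvStepA st := by
  induction l generalizing st with
  | nil => rfl
  | cons c t ih =>
      by_cases hc : pvIsBracket c = true
      · simp [hc, List.foldl_cons, ih]
      · simp only [Bool.not_eq_true] at hc
        simp [hc, List.foldl_cons, pvStepA_nonbracket st c hc, ih]

-- an adjacent matching pair cancels in A's scan
theorem pvStepA_cancel (st : List Char × List Char) (o c : Char)
    (h : pvIsPair o c = true) : pvStepA (pvStepA st o) c = st := by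
  simp only [pvIsPair, decide_eq_true_eq, List.mem_cons, List.not_mem_nil, or_false,
    Prod.mk.injEq] at h
  rcases h with ⟨rfl, rfl⟩ | ⟨rfl, rfl⟩ | ⟨rfl, rfl⟩ | ⟨rfl, rfl⟩ <;> simp [pvStepA] <;>
    (intro hx; exact absurd (by decide) hx)

theorem pvFoldA_reduceOnce (t : List Char) (st : List Char × List Char) :
    t.foldl pvStepA st = (pvReduceOnce t).foldl pvStepA st := by
  fun_induction pvReduceOnce t generalizing st with
  | case1 x y rest hp ih =>
      simp only [List.foldl_cons, pvStepA_cancel st x y hp]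
      exact ih st
  | case2 x y rest hp ih => simp only [List.foldl_cons] at *; exact ih _
  | case3 x => rfl
  | case4 => rfl

theorem pvFoldA_reduceFix (t : List Char) (st : List Char × List Char) :
    t.foldl pvStepA st = (pvReduceFix t).foldl pvStepA st := by
  fun_induction pvReduceFix t with
  | case1 t t2 _ => rfl
  | case2 t t2 h ih => rw [pvFoldA_reduceOnce t st]; exact ih

theorem pvReduceFix_fixed (t : List Char) : pvReduceOnce (pvReduceFix t) = pvReduceFix t := by
  fun_induction pvReduceFix t with
  | case1 t t2 h => exact h
  | case2 t t2 h ih => exact ih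

theorem pvReduceOnce_subset (t : List Char) (a : Char) (h : a ∈ pvReduceOnce t) : a ∈ t := by
  fun_induction pvReduceOnce t with
  | case1 x y rest hp ih => simp only [List.mem_cons]; exact Or.inr (Or.inr (ih h))
  | case2 x y rest hp ih =>
      simp only [List.mem_cons] at h ⊢
      rcases h with rfl | h
      · exact Or.inl rfl
      · have := ih h; simp only [List.mem_cons] at this; tauto
  | case3 x => exact h
  | case4 => exact h

theorem pvReduceFix_subset (t : List Char) (a : Char) (h : a ∈ pvReduceFix t) : a ∈ t := by
  fun_induction pvReduceFix t with
  | case1 t t2 heq => exact h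
  | case2 t t2 heq ih => exact pvReduceOnce_subset t a (ih h)

-- the normal form has no adjacent matching pair
theorem pvNoAdj (t : List Char) (hfix : pvReduceOnce t = t)
    (l₁ l₂ : List Char) (p q : Char) (hsplit : t = l₁ ++ p :: q :: l₂) :
    pvIsPair p q = false := by
  induction t generalizing l₁ with
  | nil => simp at hsplit
  | cons x rest ihx =>
      cases rest with
      | nil =>
          cases l₁ <;> simp_all
      | cons y rest' =>
          by_cases hp : pvIsPair x y = true
          · exfalso
            have h1 : pvReduceOnce (x :: y :: rest') = pvReduceOnce rest' := by
              simp [pvReduceOnce, hp]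
            have h2 := pvReduceOnce_length_le rest'
            rw [hfix] at h1
            have := congrArg List.length h1
            simp only [List.length_cons] at this
            omega
          · simp only [Bool.not_eq_true] at hp
            have h1 : pvReduceOnce (x :: y :: rest') = x :: pvReduceOnce (y :: rest') := by
              simp [pvReduceOnce, hp]
            rw [hfix] at h1
            have hy : pvReduceOnce (y :: rest') = y :: rest' := by
              injection h1.symm
            cases l₁ with
            | nil =>
                simp only [List.nil_append, List.cons.injEq] at hsplit
                obtain ⟨rfl, rfl, _⟩ := hsplit
                exact hp
            | cons a l₁' =>
                simp only [List.cons_append, List.cons.injEq] at hsplit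
                exact ihx hy l₁' hsplit.2

-- scanning a run of open brackets pushes them
theorem pvFoldA_opens (v : List Char) (s1 s2 : List Char)
    (h : ∀ c ∈ v, c ∈ (['(', '[', '{', '<'] : List Char)) :
    v.foldl pvStepA (s1, s2) = (v.reverse ++ s1, s2) := by
  induction v generalizing s1 with
  | nil => simp
  | cons c w ih =>
      have hc := h c (List.mem_cons_self ..)
      have hstep : pvStepA (s1, s2) c = (c :: s1, s2) := by
        fin_cases hc <;> simp [pvStepA]
      simp only [List.foldl_cons, hstep, List.reverse_cons, List.append_assoc]
      simpa using ih (c :: s1) (fun d hd => h d (List.mem_cons_of_mem _ hd))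

-- A's closestack never shrinks
theorem pvStepA_snd_le (st : List Char × List Char) (c : Char) :
    st.2.length ≤ (pvStepA st c).2.length := by
  simp only [pvStepA]
  split_ifs <;> simp <;> omega

theorem pvFoldA_snd_le (l : List Char) (st : List Char × List Char) :
    st.2.length ≤ (l.foldl pvStepA st).2.length := by
  induction l generalizing st with
  | nil => exact le_refl _
  | cons c w ih => exact le_trans (pvStepA_snd_le st c) (ih _)

-- A's match test, phrased through pvIsPair
theorem pvMatch_iff (o c : Char) (hc : c ∈ ([')', ']', '}', '>'] : List Char)) :
    ((['(', '[', '{', '<'] : List Char).getD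
        ((PySem.List.index? ([')', ']', '}', '>'] : List Char) c).getD 0) ' ' = o)
      ↔ pvIsPair o c = true := by
  fin_cases hc <;> simp [pvIsPair] <;> tauto

-- both scoring folds agree on open brackets
theorem pvScore_congr (l : List Char) (h : ∀ c ∈ l, c ∈ (['(', '[', '{', '<'] : List Char))
    (init : Int) :
    l.foldl (fun sc c =>
        sc * 5 + ([1, 2, 3, 4] : List Int).getD
          ((PySem.List.index? (['(', '[', '{', '<'] : List Char) c).getD 0) 0) init
      = l.foldl (fun sc c => sc * 5 + pvPoints.getD c 0) init := by
  apply PySem.List.foldl_congr_mem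
  intro acc x hx
  have hx4 := h x hx
  fin_cases hx4 <;> rfl

-- ===== VERDICT (by name: the statement is the Claim_ definition above) =====
theorem check_balance2_spec : Claim_equal_check_balance2 := by
  intro e _
  unfold Spec_check_balance2 check_balance2 check_balance2_alt
  dsimp only
  have hf : e.toList.foldl pvStepA ([], []) =
      (pvReduceFix (e.toList.filter pvIsBracket)).foldl pvStepA ([], []) := by
    rw [pvFoldA_filter, pvFoldA_reduceFix]
  set u := pvReduceFix (e.toList.filter pvIsBracket) with hu
  have hfix : pvReduceOnce u = u := pvReduceFix_fixed _
  have hbr : ∀ c ∈ u, pvIsBracket c = true := by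
    intro c hc
    have := pvReduceFix_subset _ c hc
    exact (List.mem_filter.mp this).2
  by_cases hcl : ∀ c ∈ u, c ∈ (['(', '[', '{', '<'] : List Char)
  · -- no closing bracket survives: both compute the autocomplete score
    have hfold : u.foldl pvStepA ([], []) = (u.reverse, []) := by
      simpa using pvFoldA_opens u [] [] hcl
    have hany : u.any (fun c => (pvPoints.get? c).isNone) = false := by
      simp only [List.any_eq_false]
      intro c hc
      have := hcl c hc
      fin_cases this <;> decide
    simp only [hf, hfold, hany, List.isEmpty_nil, if_true, Bool.false_eq_true, if_false]
    exact pvScore_congr u.reverse (fun c hc => hcl c (List.mem_reverse.mp hc)) 0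
  · -- a closing bracket survives: both return 0
    push_neg at hcl
    obtain ⟨c0, hc0u, hc0no⟩ := hcl
    have hc0cl : c0 ∈ ([')', ']', '}', '>'] : List Char) :=
      (pvBracket_cases c0 (hbr c0 hc0u)).resolve_left hc0no
    have hany : u.any (fun c => (pvPoints.get? c).isNone) = true := by
      refine List.any_eq_true.mpr ⟨c0, hc0u, ?_⟩
      fin_cases hc0cl <;> decide
    -- A's closestack is nonempty at the end of the scan of u
    have hne : (u.foldl pvStepA ([], [])).2.isEmpty = false := by
      cases hd : u.dropWhile (fun c => decide (c ∈ (['(', '[', '{', '<'] : List Char))) with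
      | nil =>
          exfalso
          have hto : u = u.takeWhile (fun c => decide (c ∈ (['(', '[', '{', '<'] : List Char))) := by
            conv_lhs => rw [← List.takeWhile_append_dropWhile
              (p := fun c => decide (c ∈ (['(', '[', '{', '<'] : List Char))) (l := u)]
            rw [hd, List.append_nil]
          have := List.mem_takeWhile_imp (hto ▸ hc0u)
          simp only [decide_eq_true_eq] at this
          exact hc0no this
      | cons d w =>
          have hdu : u = u.takeWhile (fun c => decide (c ∈ (['(', '[', '{', '<'] : List Char)))
              ++ d :: w := by
            conv_lhs => rw [← List.takeWhile_append_dropWhile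
              (p := fun c => decide (c ∈ (['(', '[', '{', '<'] : List Char))) (l := u)]
            rw [hd]
          have hpd : (fun c => decide (c ∈ (['(', '[', '{', '<'] : List Char))) d = false := by
            have h0 := List.head_dropWhile_not
              (fun c => decide (c ∈ (['(', '[', '{', '<'] : List Char))) (l := u)
              (w := by rw [hd]; simp)
            have h1 : (u.dropWhile (fun c => decide (c ∈ (['(', '[', '{', '<'] : List Char)))).head
                (by rw [hd]; simp) = d := by simp only [hd, List.head_cons]
            rw [h1] at h0
            simpa using h0
          have hdo : d ∉ (['(', '[', '{', '<'] : List Char) := by simpa using hpd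
          have hdin : d ∈ u := by rw [hdu]; simp
          have hdcl : d ∈ ([')', ']', '}', '>'] : List Char) :=
            (pvBracket_cases d (hbr d hdin)).resolve_left hdo
          have hvopens : ∀ c ∈ u.takeWhile (fun c => decide (c ∈ (['(', '[', '{', '<'] : List Char))),
              c ∈ (['(', '[', '{', '<'] : List Char) := by
            intro c hc
            have := List.mem_takeWhile_imp hc
            simpa using this
          have hnm : ¬ ((u.takeWhile (fun c => decide (c ∈ (['(', '[', '{', '<'] : List Char)))).reverse.head?
              = some ((['(', '[', '{', '<'] : List Char).getD
                  ((PySem.List.index? ([')', ']', '}', '>'] : List Char) d).getD 0) ' ')) := by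
            intro hm
            cases hv : (u.takeWhile (fun c => decide (c ∈ (['(', '[', '{', '<'] : List Char)))).reverse with
            | nil => rw [hv] at hm; simp at hm
            | cons o r =>
                rw [hv] at hm
                have ho : ((['(', '[', '{', '<'] : List Char).getD
                    ((PySem.List.index? ([')', ']', '}', '>'] : List Char) d).getD 0) ' ') = o := by
                  simpa using hm.symm
                have hvv : u.takeWhile (fun c => decide (c ∈ (['(', '[', '{', '<'] : List Char)))
                    = r.reverse ++ [o] := by
                  have := congrArg List.reverse hv
                  simpa using this
                have hub : u = r.reverse ++ o :: d :: w := by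
                  rw [hdu, hvv]; simp
                have hno := pvNoAdj u hfix r.reverse w o d hub
                have := (pvMatch_iff o d hdcl).mp ho
                rw [this] at hno
                exact absurd hno (by simp)
          have hstep : pvStepA
              ((u.takeWhile (fun c => decide (c ∈ (['(', '[', '{', '<'] : List Char)))).reverse, []) d
              = ((u.takeWhile (fun c => decide (c ∈ (['(', '[', '{', '<'] : List Char)))).reverse,
                  [d, d]) := by
            simp only [pvStepA, hdcl, if_true]
            rw [if_neg hdo, if_neg hnm]
          have hfoldu : u.foldl pvStepA ([], []) = w.foldl pvStepA
              ((u.takeWhile (fun c => decide (c ∈ (['(', '[', '{', '<'] : List Char)))).reverse,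
                [d, d]) := by
            conv_lhs => rw [hdu]
            rw [List.foldl_append, pvFoldA_opens _ [] [] hvopens, List.append_nil,
              List.foldl_cons, hstep]
          have hlen := pvFoldA_snd_le w
            ((u.takeWhile (fun c => decide (c ∈ (['(', '[', '{', '<'] : List Char)))).reverse, [d, d])
          rw [hfoldu]
          cases h2 : (w.foldl pvStepA
              ((u.takeWhile (fun c => decide (c ∈ (['(', '[', '{', '<'] : List Char)))).reverse,
                [d, d])).2 with
          | nil => rw [h2] at hlen; simp at hlen
          | cons a b => simp
    simp only [hf, hne, hany, if_true, Bool.false_eq_true, if_false]
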